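-- pv_equiv track=rewrite | github.com/PedroLunet/FP | Py07/Treasure.py | treasure
-- ===== SOURCE A (Python) =====
-- def treasure(clues):
--     visited = set()
--     current_location = (0, 0)
--
--     while current_location in clues:
--         visited.add(current_location)
--         current_location = clues[current_location]
--
--         if current_location in visited:
--             break
--
--     return current_location
-- ===== SOURCE B (Python) =====
-- def treasure(clues):
--     current = (0, 0)
--     path = []
--     for _ in range(len(clues) + 1):
--         if current not in clues:
--             return current
--         path.append(current)
--         current = clues[current]
--     for p in path:
--         if path.count(p) > 1:
--             return p
-- ===== Notes on version B (the rewrite author's own statement) =====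
-- stated objective: alternative
-- what changed: B drops A's online visited-set bookkeeping: it walks at most len(clues)+1 steps recording the bare path (no membership test in the loop), and only if no chain end was reached scans that path offline for the first node occurring more than once, which by the functional-graph structure is exactly A's first-revisited cycle-entry node.
import Mathlib
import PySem

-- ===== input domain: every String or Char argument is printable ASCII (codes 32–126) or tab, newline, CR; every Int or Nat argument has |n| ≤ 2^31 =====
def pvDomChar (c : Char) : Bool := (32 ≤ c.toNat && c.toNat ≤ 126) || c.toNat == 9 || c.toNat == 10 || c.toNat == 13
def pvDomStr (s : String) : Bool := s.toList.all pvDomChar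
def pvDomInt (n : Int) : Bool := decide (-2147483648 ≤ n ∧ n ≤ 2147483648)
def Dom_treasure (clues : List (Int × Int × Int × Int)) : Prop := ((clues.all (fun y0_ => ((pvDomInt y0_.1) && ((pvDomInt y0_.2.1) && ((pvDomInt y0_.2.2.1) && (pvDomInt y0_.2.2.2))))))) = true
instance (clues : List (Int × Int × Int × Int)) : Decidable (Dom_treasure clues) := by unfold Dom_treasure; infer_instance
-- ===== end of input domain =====

-- B replaces A's online visited-set walk by a bounded walk that records the path with no
-- membership test, followed by an offline scan for the first node occurring more than once
-- (objective: alternative decomposition, same return value; no speed claim).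

-- ===== PORT A =====
-- interface glue shared by both ports: the flattened 4-tuple list as the Python dict
def pvClueDict (clues : List (Int × Int × Int × Int)) : PySem.Dict (Int × Int) (Int × Int) :=
  PySem.Dict.ofList (clues.map (fun q => ((q.1, q.2.1), (q.2.2.1, q.2.2.2))))

-- the while-loop of A: 'current in clues' + 'clues[current]' fused into one get?;
-- fuel d.size + 1 is provably enough (each iteration adds a fresh key to visited)
def treasureGo (d : PySem.Dict (Int × Int) (Int × Int)) :
    Nat → PySem.Set (Int × Int) → Int × Int → Int × Int
  | 0, _, cur => cur
  | fuel + 1, visited, cur =>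
    match d.get? cur with
    | none => cur
    | some nxt =>
      if (visited.add cur).contains nxt then nxt
      else treasureGo d fuel (visited.add cur) nxt

def treasure (clues : List (Int × Int × Int × Int)) : Int × Int :=
  let d := pvClueDict clues
  treasureGo d (d.size + 1) PySem.Set.empty (0, 0)

-- ===== PORT B =====
-- phase 1 of B: the 'for _ in range(len(clues) + 1)' loop; inl = early 'return current',
-- inr = loop exhausted, carrying the recorded path
def treasureWalk (d : PySem.Dict (Int × Int) (Int × Int)) :
    Nat → Int × Int → List (Int × Int) → (Int × Int) ⊕ (List (Int × Int))
  | 0, _, path => Sum.inr path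
  | fuel + 1, cur, path =>
    match d.get? cur with
    | none => Sum.inl cur
    | some nxt => treasureWalk d fuel nxt (path ++ [cur])

-- phase 2 of B: first node of the path occurring more than once; the .getD default is
-- unreachable (the scan is only run when the path provably holds a duplicate)
def treasureScan (path : List (Int × Int)) : Int × Int :=
  (path.find? (fun p => decide (1 < PySem.List.count path p))).getD (0, 0)

def treasure_alt (clues : List (Int × Int × Int × Int)) : Int × Int :=
  let d := pvClueDict clues
  match treasureWalk d (d.size + 1) (0, 0) [] with
  | Sum.inl t => t
  | Sum.inr path => treasureScan path

-- ===== PRECONDITION & SPEC =====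
def Spec_treasure (clues : List (Int × Int × Int × Int)) (out : Int × Int) : Prop := out = treasure_alt clues
instance (clues : List (Int × Int × Int × Int)) (out : Int × Int) : Decidable (Spec_treasure clues out) := by unfold Spec_treasure; infer_instance

-- ===== CLAIM (what is proved, stated in full; the proofs are below) =====
def Claim_equal_treasure : Prop := ∀ (clues : List (Int × Int × Int × Int)), Dom_treasure clues → Spec_treasure clues (treasure clues)

-- ===== LEMMAS AND PROOFS =====

-- the number of keys of any dict equals its size
theorem pv_keys_length (d : PySem.Dict (Int × Int) (Int × Int)) : d.keys.length = d.size := by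
  simp [PySem.Dict.keys, PySem.Dict.size]

-- a set-successor closure extracted from a chain that loops back to an element of S
theorem pv_closed_of_isChain (d : PySem.Dict (Int × Int) (Int × Int))
    (S : List (Int × Int)) (w : Int × Int)
    (hch : List.IsChain (fun a b => d.get? a = some b) (S ++ [w])) (hw : w ∈ S) :
    ∀ c ∈ S, ∃ c', d.get? c = some c' ∧ c' ∈ S := by
  intro c hc
  obtain ⟨i, hi, hval⟩ := List.mem_iff_getElem.mp hc
  have h2 : i + 1 < (S ++ [w]).length := by simp; omega
  have hr := List.isChain_iff_getElem.mp hch i h2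
  have hleft : (S ++ [w])[i]'(by simp; omega) = c := by
    rw [List.getElem_append_left hi]; exact hval
  by_cases hlt : i + 1 < S.length
  · exact ⟨S[i + 1], by rw [hleft] at hr; rwa [List.getElem_append_left hlt] at hr,
      List.getElem_mem hlt⟩
  · have hieq : i + 1 = S.length := by omega
    refine ⟨w, ?_, hw⟩
    rw [hleft] at hr
    have hw2 : (S ++ [w])[i + 1]'h2 = w := by
      rw [List.getElem_append_right (by omega)]
      simp [hieq]
    rwa [hw2] at hr

-- phase-1 walk from inside an f-closed set S never leaves S and exhausts its fuel
theorem pv_walk_closed (d : PySem.Dict (Int × Int) (Int × Int)) (S : List (Int × Int))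
    (hS : ∀ c ∈ S, ∃ c', d.get? c = some c' ∧ c' ∈ S) :
    ∀ (g : Nat) (c : Int × Int) (path : List (Int × Int)), c ∈ S →
      ∃ r, treasureWalk d g c path = Sum.inr (path ++ r) ∧
        (∀ x ∈ r, x ∈ S) ∧ (0 < g → r.head? = some c) := by
  intro g
  induction g with
  | zero => intro c path _; exact ⟨[], by simp [treasureWalk], by simp, by omega⟩
  | succ g ih =>
    intro c path hc
    obtain ⟨c', hc', hc'S⟩ := hS c hc
    obtain ⟨r, hr, hmem, _⟩ := ih c' (path ++ [c]) hc'S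
    refine ⟨c :: r, ?_, ?_, fun _ => rfl⟩
    · simp only [treasureWalk, hc']; rw [hr]; simp
    · intro x hx; rcases List.mem_cons.mp hx with rfl | hx
      · exact hc
      · exact hmem x hx

-- main coupling: from any consistent mid-loop state the two loops agree
theorem pv_treasure_main (d : PySem.Dict (Int × Int) (Int × Int)) :
    ∀ (fuel : Nat) (path : List (Int × Int)) (cur : Int × Int),
      path.length + fuel = d.size + 1 →
      (path ++ [cur]).Nodup →
      (∀ p ∈ path, p ∈ d.keys) →
      List.IsChain (fun a b => d.get? a = some b) (path ++ [cur]) →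
      treasureGo d fuel path cur =
        (match treasureWalk d fuel cur path with
         | Sum.inl t => t
         | Sum.inr full => treasureScan full) := by
  intro fuel
  induction fuel with
  | zero =>
    intro path cur hlen hnodup hkeys _
    exfalso
    have hpn : path.Nodup := (List.nodup_append.mp hnodup).1
    have hsub : path ⊆ d.keys := fun p hp => hkeys p hp
    have := (List.subperm_of_subset hpn hsub).length_le
    rw [pv_keys_length] at this
    omega
  | succ fuel ih =>
    intro path cur hlen hnodup hkeys hch
    have hpn : path.Nodup := (List.nodup_append.mp hnodup).1
    have hcur_not : cur ∉ path := by
      intro hmem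
      exact (List.nodup_append.mp hnodup).2.2 cur hmem cur (List.mem_singleton.mpr rfl) rfl
    have hadd : (PySem.Set.add path cur) = path ++ [cur] := by
      unfold PySem.Set.add
      rw [if_neg]
      simp only [PySem.Set.contains]
      intro hcon
      exact hcur_not (List.contains_iff_mem.mp hcon)
    cases hget : d.get? cur with
    | none =>
      simp [treasureGo, treasureWalk, hget]
    | some nxt =>
      have hcur_keys : cur ∈ d.keys := by
        by_contra hn
        rw [← PySem.Dict.get?_eq_none_iff_not_mem_keys] at hn
        rw [hget] at hn; simp at hn
      have hlen1 : (path ++ [cur]).length ≤ d.size := by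
        have hn1 : (path ++ [cur]).Nodup := hnodup
        have hsub : (path ++ [cur]) ⊆ d.keys := by
          intro p hp
          rcases List.mem_append.mp hp with hp | hp
          · exact hkeys p hp
          · rw [List.mem_singleton.mp hp]; exact hcur_keys
        have := (List.subperm_of_subset hn1 hsub).length_le
        rwa [pv_keys_length] at this
      have hchain1 : List.IsChain (fun a b => d.get? a = some b) ((path ++ [cur]) ++ [nxt]) := by
        refine List.IsChain.append hch (List.isChain_singleton nxt) ?_
        intro x hx y hy
        rw [List.getLast?_concat] at hx
        simp only [List.head?_cons, Option.mem_def, Option.some.injEq] at hx hy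
        rw [← hx, ← hy]; exact hget
      by_cases hmem : nxt ∈ path ++ [cur]
      · -- A breaks and returns nxt; B keeps cycling until its fuel runs out
        have hcont : (PySem.Set.add path cur).contains nxt = true := by
          rw [hadd]
          simp only [PySem.Set.contains]
          exact List.contains_iff_mem.mpr hmem
        have hA : treasureGo d (fuel + 1) path cur = nxt := by
          simp only [treasureGo, hget, hcont, if_true]
        obtain ⟨pre, suf, hdecomp⟩ := List.append_of_mem hmem
        have hSch : List.IsChain (fun a b => d.get? a = some b) ((nxt :: suf) ++ [nxt]) := by
          have : (path ++ [cur]) ++ [nxt] = pre ++ ((nxt :: suf) ++ [nxt]) := by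
            rw [hdecomp]; simp
          rw [this] at hchain1
          exact (List.isChain_append.mp hchain1).2.1
        have hSclosed := pv_closed_of_isChain d (nxt :: suf) nxt hSch (List.mem_cons_self)
        have hfuelpos : 0 < fuel := by
          have : (path ++ [cur]).length = path.length + 1 := by simp
          omega
        obtain ⟨r, hwalk, hrS, hrhead⟩ :=
          pv_walk_closed d (nxt :: suf) hSclosed fuel nxt (path ++ [cur]) (List.mem_cons_self)
        obtain ⟨r', rfl⟩ : ∃ r', r = nxt :: r' := by
          cases r with
          | nil => exact absurd (hrhead hfuelpos) (by simp)
          | cons a t =>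
            have := hrhead hfuelpos
            simp only [List.head?_cons, Option.some.injEq] at this
            exact ⟨t, by rw [this]⟩
        have hB : treasureWalk d (fuel + 1) cur path = Sum.inr ((path ++ [cur]) ++ nxt :: r') := by
          simp only [treasureWalk, hget]; exact hwalk
        rw [hA, hB]
        -- it remains to show the offline scan lands on nxt
        have hfull : (path ++ [cur]) ++ nxt :: r' = pre ++ (nxt :: (suf ++ nxt :: r')) := by
          rw [hdecomp]; simp
        have hd1 : pre.Nodup ∧ (nxt :: suf).Nodup ∧ ∀ a ∈ pre, ∀ b ∈ nxt :: suf, a ≠ b := by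
          have := hnodup; rw [hdecomp, List.nodup_append] at this; exact this
        have hcnt_pre : ∀ x ∈ pre, ¬ (1 < List.count x ((path ++ [cur]) ++ nxt :: r')) := by
          intro x hx
          have h1 : List.count x (path ++ [cur]) ≤ 1 :=
            List.nodup_iff_count_le_one.mp hnodup x
          have hx_not : x ∉ nxt :: r' := by
            intro hxr
            rcases List.mem_cons.mp hxr with rfl | hxr
            · exact hd1.2.2 x hx x List.mem_cons_self rfl
            · exact hd1.2.2 x hx x (hrS x (List.mem_cons_of_mem _ hxr)) rfl
          have h2 : List.count x (nxt :: r') = 0 := List.count_eq_zero.mpr hx_not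
          rw [List.count_append, h2]
          omega
        have hcnt_nxt : 1 < List.count nxt ((path ++ [cur]) ++ nxt :: r') := by
          have h1 : 0 < List.count nxt (path ++ [cur]) := List.count_pos_iff.mpr hmem
          have h2 : 0 < List.count nxt (nxt :: r') := by
            rw [List.count_cons_self]; omega
          rw [List.count_append]; omega
        have hgoal : treasureScan ((path ++ [cur]) ++ nxt :: r') = nxt := by
          unfold treasureScan
          rw [hfull, List.find?_append]
          have hnone : List.find?
              (fun p => decide (1 < PySem.List.count (pre ++ (nxt :: (suf ++ nxt :: r'))) p))
              pre = none := by
            rw [List.find?_eq_none]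
            intro x hx
            have hc := hcnt_pre x hx
            rw [hfull] at hc
            simp only [PySem.List.count, decide_eq_true_eq]
            exact hc
          rw [hnone, Option.none_or]
          rw [List.find?_cons_of_pos (by
            simp only [PySem.List.count, decide_eq_true_eq]
            rw [← hfull]; exact hcnt_nxt)]
          rfl
        exact hgoal.symm
      · -- no revisit: both loops step together
        have hcont : (PySem.Set.add path cur).contains nxt = false := by
          rw [hadd]
          simp only [PySem.Set.contains]
          rw [Bool.eq_false_iff]
          intro hcon
          exact hmem (List.contains_iff_mem.mp hcon)
        have hA : treasureGo d (fuel + 1) path cur = treasureGo d fuel (path ++ [cur]) nxt := by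
          have hcont' : PySem.Set.contains (path ++ [cur]) nxt = false := hadd ▸ hcont
          simp only [treasureGo, hget, hadd, hcont', Bool.false_eq_true, if_false]
        have hB : treasureWalk d (fuel + 1) cur path = treasureWalk d fuel nxt (path ++ [cur]) := by
          simp [treasureWalk, hget]
        rw [hA, hB]
        refine ih (path ++ [cur]) nxt (by simp; omega) ?_ ?_ hchain1
        · rw [List.nodup_append]
          exact ⟨hnodup, List.nodup_singleton nxt, by
            intro a ha b hb
            rw [List.mem_singleton.mp hb]
            intro h; exact hmem (h ▸ ha)⟩
        · intro p hp
          rcases List.mem_append.mp hp with hp | hp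
          · exact hkeys p hp
          · rw [List.mem_singleton.mp hp]; exact hcur_keys

-- ===== VERDICT (by name: the statement is the Claim_ definition above) =====
theorem treasure_spec : Claim_equal_treasure := by
  intro clues _
  unfold Spec_treasure treasure treasure_alt
  exact pv_treasure_main (pvClueDict clues)
    ((pvClueDict clues).size + 1) [] (0, 0) (by simp) (by simp)
    (by simp) (by simp)
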